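-- pv_equiv track=rewrite | github.com/AdamZhouSE/pythonHomework | Code/CodeRecords/2674/60693/304286.py | computeSubString
-- ===== SOURCE A (Python) =====
-- def computeSubString(inp):
--     aIndex,bIndex,cIndex=[],[],[]
--     for i in range(len(inp)):
--         if inp[i]=='a':
--             aIndex.append(i)
--         elif inp[i]=='b':
--             bIndex.append(i)
--         elif inp[i]=='c':
--             cIndex.append(i)
--     res=0
--     biggerX=0
--     for x in aIndex:
--         biggerX+=1
--         biggerY=0
--         for y in bIndex:
--             if y>x:
--                 biggerY+=1
--                 biggerZ=0
--                 for z in cIndex: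
--                     if z>y:
--                         biggerZ+=1
--                         res+=biggerY*biggerX*biggerZ
--     return res
-- ===== SOURCE B (Python) =====
-- def computeSubString(inp):
--     # One right-to-left pass with running aggregates instead of three nested loops.
--     res = ga = gall = tb = nc = 0
--     for ch in reversed(inp):
--         if ch == 'a':
--             res += gall + ga
--             ga += gall
--         elif ch == 'b':
--             t = nc * (nc + 1) // 2
--             gall += t + tb
--             tb += t
--         elif ch == 'c':
--             nc += 1
--     return res
-- ===== Notes on version B (the rewrite author's own statement) =====
-- stated objective: faster
-- what changed: Replaces the three nested index-list loops by a single right-to-left pass that maintains running aggregates (triangular c-count, rank-weighted b-sums, a-sums), collapsing the cubic enumeration into O(n).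
import Mathlib
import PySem

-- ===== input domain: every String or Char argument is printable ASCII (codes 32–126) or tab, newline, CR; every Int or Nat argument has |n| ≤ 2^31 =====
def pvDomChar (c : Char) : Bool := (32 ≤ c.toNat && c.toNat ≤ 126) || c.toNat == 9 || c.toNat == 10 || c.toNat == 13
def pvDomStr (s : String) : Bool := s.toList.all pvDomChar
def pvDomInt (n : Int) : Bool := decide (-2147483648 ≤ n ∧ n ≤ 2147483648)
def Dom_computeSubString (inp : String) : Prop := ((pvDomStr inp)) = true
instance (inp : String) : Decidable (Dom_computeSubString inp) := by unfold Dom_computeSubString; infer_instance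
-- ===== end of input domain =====

-- B replaces A's three nested loops over the 'a'/'b'/'c' index lists by one right-to-left
-- pass over the string that maintains running aggregates; return values agree on all inputs.

-- ===== PORT A =====
def pvBuildStep (inp : String) (acc : List Int × List Int × List Int) (i : Int) :
    List Int × List Int × List Int :=
  if PySem.Str.pyGet? inp i = some 'a' then (acc.1 ++ [i], acc.2.1, acc.2.2)
  else if PySem.Str.pyGet? inp i = some 'b' then (acc.1, acc.2.1 ++ [i], acc.2.2)
  else if PySem.Str.pyGet? inp i = some 'c' then (acc.1, acc.2.1, acc.2.2 ++ [i])
  else acc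

def computeSubString (inp : String) : Int :=
  let built := (PySem.List.pyRange 0 (PySem.Str.len inp) 1).foldl (pvBuildStep inp) ([], [], [])
  let aIndex := built.1
  let bIndex := built.2.1
  let cIndex := built.2.2
  (aIndex.foldl (fun (p : Int × Int) x =>
      ((bIndex.foldl (fun (q : Int × Int) y =>
          if y > x then
            ((cIndex.foldl (fun (r : Int × Int) z =>
                if z > y then (r.1 + (q.2 + 1) * (p.2 + 1) * (r.2 + 1), r.2 + 1) else r)
              (q.1, 0)).1, q.2 + 1)
          else q)
        (p.1, 0)).1, p.2 + 1))
    ((0 : Int), (0 : Int))).1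

-- ===== PORT B =====
-- state (res, ga, gall, tb, nc), updated per character of reversed(inp)
def pvBStep (st : Int × Int × Int × Int × Int) (ch : Char) : Int × Int × Int × Int × Int :=
  if ch = 'a' then (st.1 + st.2.2.1 + st.2.1, st.2.1 + st.2.2.1, st.2.2.1, st.2.2.2.1, st.2.2.2.2)
  else if ch = 'b' then
    (st.1, st.2.1,
     st.2.2.1 + PySem.Int.floordiv (st.2.2.2.2 * (st.2.2.2.2 + 1)) 2 + st.2.2.2.1,
     st.2.2.2.1 + PySem.Int.floordiv (st.2.2.2.2 * (st.2.2.2.2 + 1)) 2, st.2.2.2.2)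
  else if ch = 'c' then (st.1, st.2.1, st.2.2.1, st.2.2.2.1, st.2.2.2.2 + 1)
  else st

def computeSubString_alt (inp : String) : Int :=
  ((inp.toList.reverse).foldl pvBStep ((0 : Int), (0 : Int), (0 : Int), (0 : Int), (0 : Int))).1

-- ===== PRECONDITION & SPEC =====
def Spec_computeSubString (inp : String) (out : Int) : Prop := out = computeSubString_alt inp
instance (inp : String) (out : Int) : Decidable (Spec_computeSubString inp out) := by unfold Spec_computeSubString; infer_instance

-- ===== CLAIM (what is proved, stated in full; the proofs are below) =====
def Claim_equal_computeSubString : Prop := ∀ (inp : String), Dom_computeSubString inp → Spec_computeSubString inp (computeSubString inp)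

-- ===== LEMMAS AND PROOFS =====

-- positions (offset k) of character c in a list of chars
def pvPos (c : Char) : List Char → Int → List Int
  | [], _ => []
  | d :: t, k => if d = c then k :: pvPos c t (k + 1) else pvPos c t (k + 1)

def pvTri : Nat → Int
  | 0 => 0
  | n + 1 => ((n : Int) + 1) + pvTri n

-- sum of ranks (continuing after r) of elements of cI greater than y (A's innermost loop)
def pvCS (y : Int) : List Int → Int → Int
  | [], _ => 0
  | z :: l, r => if z > y then (r + 1) + pvCS y l (r + 1) else pvCS y l r

-- A's middle loop: rank-weighted sum over b's greater than x
def pvGS (x : Int) (cI : List Int) : List Int → Int → Int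
  | [], _ => 0
  | y :: l, r => if y > x then (r + 1) * pvCS y cI 0 + pvGS x cI l (r + 1) else pvGS x cI l r

-- pvGS with no threshold (every b qualifies)
def pvGAll (cI : List Int) : List Int → Int → Int
  | [], _ => 0
  | y :: l, r => (r + 1) * pvCS y cI 0 + pvGAll cI l (r + 1)

def pvTS (cI : List Int) : List Int → Int
  | [] => 0
  | y :: l => pvCS y cI 0 + pvTS cI l

-- A's outer loop
def pvFS (bI cI : List Int) : List Int → Int → Int
  | [], _ => 0
  | x :: l, i => (i + 1) * pvGS x cI bI 0 + pvFS bI cI l (i + 1)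

def pvGA (bI cI : List Int) : List Int → Int
  | [] => 0
  | x :: l => pvGS x cI bI 0 + pvGA bI cI l

theorem pvPos_le {c : Char} : ∀ (u : List Char) (k y : Int), y ∈ pvPos c u k → k ≤ y := by
  intro u
  induction u with
  | nil => intro k y h; simp [pvPos] at h
  | cons d t ih =>
    intro k y h
    simp only [pvPos] at h
    by_cases hd : d = c
    · rw [if_pos hd] at h
      rcases List.mem_cons.mp h with h | h
      · omega
      · have := ih (k + 1) y h; omega
    · rw [if_neg hd] at h
      have := ih (k + 1) y h; omega

theorem pv_cfold (W y : Int) : ∀ (cI : List Int) (res r : Int),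
    ((cI.foldl (fun (c : Int × Int) z =>
        if z > y then (c.1 + W * (c.2 + 1), c.2 + 1) else c) (res, r))).1
      = res + W * pvCS y cI r := by
  intro cI
  induction cI with
  | nil => intro res r; simp [pvCS]
  | cons z l ih =>
    intro res r
    by_cases hz : z > y
    · simp only [List.foldl_cons, if_pos hz]
      rw [ih]
      simp only [pvCS, if_pos hz]
      ring
    · simp only [List.foldl_cons, if_neg hz]
      rw [ih]
      simp only [pvCS, if_neg hz]

theorem pv_bfold (bx x : Int) (cI : List Int) : ∀ (bI : List Int) (res r : Int),
    ((bI.foldl (fun (q : Int × Int) y =>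
        if y > x then
          ((cI.foldl (fun (c : Int × Int) z =>
              if z > y then (c.1 + (q.2 + 1) * bx * (c.2 + 1), c.2 + 1) else c)
            (q.1, 0)).1, q.2 + 1)
        else q) (res, r))).1
      = res + bx * pvGS x cI bI r := by
  intro bI
  induction bI with
  | nil => intro res r; simp [pvGS]
  | cons yy l ih =>
    intro res r
    by_cases hy : yy > x
    · simp only [List.foldl_cons, if_pos hy]
      rw [ih, pv_cfold ((r + 1) * bx) yy cI res 0]
      simp only [pvGS, if_pos hy]
      ring
    · simp only [List.foldl_cons, if_neg hy]
      rw [ih]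
      simp only [pvGS, if_neg hy]

theorem pv_afold (bI cI : List Int) : ∀ (aI : List Int) (res i : Int),
    ((aI.foldl (fun (p : Int × Int) x =>
        ((bI.foldl (fun (q : Int × Int) y =>
            if y > x then
              ((cI.foldl (fun (c : Int × Int) z =>
                  if z > y then (c.1 + (q.2 + 1) * (p.2 + 1) * (c.2 + 1), c.2 + 1) else c)
                (q.1, 0)).1, q.2 + 1)
            else q)
          (p.1, 0)).1, p.2 + 1)) (res, i))).1
      = res + pvFS bI cI aI i := by
  intro aI
  induction aI with
  | nil => intro res i; simp [pvFS]
  | cons x l ih =>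
    intro res i
    simp only [List.foldl_cons]
    rw [ih, pv_bfold (i + 1) x cI bI res 0]
    simp only [pvFS]
    ring

theorem pvFS_succ (bI cI : List Int) : ∀ (aI : List Int) (i : Int),
    pvFS bI cI aI (i + 1) = pvFS bI cI aI i + pvGA bI cI aI := by
  intro aI
  induction aI with
  | nil => intro i; simp [pvFS, pvGA]
  | cons x l ih => intro i; simp only [pvFS, pvGA, ih]; ring

theorem pvGAll_succ (cI : List Int) : ∀ (bI : List Int) (r : Int),
    pvGAll cI bI (r + 1) = pvGAll cI bI r + pvTS cI bI := by
  intro bI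
  induction bI with
  | nil => intro r; simp [pvGAll, pvTS]
  | cons y l ih => intro r; simp only [pvGAll, pvTS, ih]; ring

theorem pvGS_all (x : Int) (cI : List Int) : ∀ (bI : List Int), (∀ y ∈ bI, x < y) →
    ∀ r, pvGS x cI bI r = pvGAll cI bI r := by
  intro bI
  induction bI with
  | nil => intro _ r; simp [pvGS, pvGAll]
  | cons y l ih =>
    intro h r
    have hy : y > x := h y (List.mem_cons_self ..)
    simp only [pvGS, pvGAll, if_pos hy]
    rw [ih (fun z hz => h z (List.mem_cons_of_mem _ hz))]

theorem pvCS_all (y : Int) : ∀ (cI : List Int), (∀ z ∈ cI, y < z) →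
    ∀ r, pvCS y cI r = r * cI.length + pvTri cI.length := by
  intro cI
  induction cI with
  | nil => intro _ r; simp [pvCS, pvTri]
  | cons z l ih =>
    intro h r
    have hz : z > y := h z (List.mem_cons_self ..)
    simp only [pvCS, if_pos hz, ih (fun w hw => h w (List.mem_cons_of_mem _ hw)),
      List.length_cons, pvTri]
    push_cast; ring

theorem pvTri_floordiv (n : Nat) :
    PySem.Int.floordiv ((n : Int) * ((n : Int) + 1)) 2 = pvTri n := by
  have h2 : (n : Int) * ((n : Int) + 1) = 2 * pvTri n := by
    induction n with
    | zero => simp [pvTri]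
    | succ m ih => simp only [pvTri]; push_cast at ih ⊢; ring_nf; ring_nf at ih; omega
  rw [h2, PySem.Int.floordiv_eq_ediv_of_pos (by norm_num)]
  exact Int.mul_ediv_cancel_left _ (by norm_num)

-- prepending a 'c'-position k below every b-position changes none of the b-sums
theorem pvCS_ccons {k y : Int} (h : k ≤ y) (cI : List Int) (r : Int) :
    pvCS y (k :: cI) r = pvCS y cI r := by
  simp only [pvCS, if_neg (by omega : ¬ k > y)]

theorem pvGS_ccons (x k : Int) (cI : List Int) : ∀ (bI : List Int), (∀ y ∈ bI, k < y) →
    ∀ r, pvGS x (k :: cI) bI r = pvGS x cI bI r := by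
  intro bI
  induction bI with
  | nil => intro _ r; simp [pvGS]
  | cons y l ih =>
    intro h r
    have hk : k ≤ y := le_of_lt (h y (List.mem_cons_self ..))
    have ht := ih (fun z hz => h z (List.mem_cons_of_mem _ hz))
    simp only [pvGS, pvCS_ccons hk, ht]

theorem pvGAll_ccons (k : Int) (cI : List Int) : ∀ (bI : List Int), (∀ y ∈ bI, k < y) →
    ∀ r, pvGAll (k :: cI) bI r = pvGAll cI bI r := by
  intro bI
  induction bI with
  | nil => intro _ r; simp [pvGAll]
  | cons y l ih =>
    intro h r
    have hk : k ≤ y := le_of_lt (h y (List.mem_cons_self ..))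
    have ht := ih (fun z hz => h z (List.mem_cons_of_mem _ hz))
    simp only [pvGAll, pvCS_ccons hk, ht]

theorem pvTS_ccons (k : Int) (cI : List Int) : ∀ (bI : List Int), (∀ y ∈ bI, k < y) →
    pvTS (k :: cI) bI = pvTS cI bI := by
  intro bI
  induction bI with
  | nil => intro _; simp [pvTS]
  | cons y l ih =>
    intro h
    have hk : k ≤ y := le_of_lt (h y (List.mem_cons_self ..))
    have ht := ih (fun z hz => h z (List.mem_cons_of_mem _ hz))
    simp only [pvTS, pvCS_ccons hk, ht]

theorem pvFS_ccons (k : Int) (bI cI : List Int) (hb : ∀ y ∈ bI, k < y) :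
    ∀ (aI : List Int) (i : Int), pvFS bI (k :: cI) aI i = pvFS bI cI aI i := by
  intro aI
  induction aI with
  | nil => intro i; simp [pvFS]
  | cons x l ih => intro i; simp only [pvFS, pvGS_ccons x k cI bI hb, ih]

theorem pvGA_ccons (k : Int) (bI cI : List Int) (hb : ∀ y ∈ bI, k < y) :
    ∀ (aI : List Int), pvGA bI (k :: cI) aI = pvGA bI cI aI := by
  intro aI
  induction aI with
  | nil => simp [pvGA]
  | cons x l ih => simp only [pvGA, pvGS_ccons x k cI bI hb, ih]

-- prepending a 'b'-position k below every a-position changes none of the a-sums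
theorem pvGS_bcons {x k : Int} (h : k < x) (cI bI : List Int) (r : Int) :
    pvGS x cI (k :: bI) r = pvGS x cI bI r := by
  simp only [pvGS, if_neg (by omega : ¬ k > x)]

theorem pvFS_bcons (k : Int) (bI cI : List Int) : ∀ (aI : List Int), (∀ x ∈ aI, k < x) →
    ∀ i, pvFS (k :: bI) cI aI i = pvFS bI cI aI i := by
  intro aI
  induction aI with
  | nil => intro _ i; simp [pvFS]
  | cons x l ih =>
    intro h i
    have hx : k < x := h x (List.mem_cons_self ..)
    simp only [pvFS, pvGS_bcons hx, ih (fun z hz => h z (List.mem_cons_of_mem _ hz))]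

theorem pvGA_bcons (k : Int) (bI cI : List Int) : ∀ (aI : List Int), (∀ x ∈ aI, k < x) →
    pvGA (k :: bI) cI aI = pvGA bI cI aI := by
  intro aI
  induction aI with
  | nil => intro _; simp [pvGA]
  | cons x l ih =>
    intro h
    have hx : k < x := h x (List.mem_cons_self ..)
    simp only [pvGA, pvGS_bcons hx, ih (fun z hz => h z (List.mem_cons_of_mem _ hz))]

-- the index-building loop of A computes the pvPos position lists
theorem pv_build (inp : String) : ∀ (u pre : List Char), pre ++ u = inp.toList →
    ∀ (aAcc bAcc cAcc : List Int),
    (PySem.List.pyRange (pre.length : Int) ((pre.length : Int) + (u.length : Int)) 1).foldl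
        (pvBuildStep inp) (aAcc, bAcc, cAcc)
      = (aAcc ++ pvPos 'a' u (pre.length : Int),
         bAcc ++ pvPos 'b' u (pre.length : Int),
         cAcc ++ pvPos 'c' u (pre.length : Int)) := by
  intro u
  induction u with
  | nil =>
    intro pre _ aAcc bAcc cAcc
    have h0 : ((List.nil (α := Char)).length : Int) = 0 := rfl
    rw [h0, add_zero, PySem.List.pyRange_one_eq_nil le_rfl]
    simp [pvPos]
  | cons d t ih =>
    intro pre h aAcc bAcc cAcc
    have hget : inp.toList[pre.length]? = some d := by
      rw [← h, List.getElem?_append_right le_rfl]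
      simp
    have hb : ((pre.length : Int) + ((d :: t).length : Int)) =
        (((pre.length : Int) + 1) + (t.length : Int)) := by
      push_cast [List.length_cons]; ring
    have hcons : PySem.List.pyRange (pre.length : Int)
        ((pre.length : Int) + ((d :: t).length : Int)) 1
        = (pre.length : Int) :: PySem.List.pyRange ((pre.length : Int) + 1)
            ((pre.length : Int) + ((d :: t).length : Int)) 1 := by
      refine PySem.List.pyRange_one_cons ?_
      push_cast [List.length_cons]; omega
    have hpre1 : (((pre ++ [d]).length : Nat) : Int) = (pre.length : Int) + 1 := by
      simp
    have ih' := ih (pre ++ [d]) (by simpa [List.append_assoc] using h)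
    rw [hcons]
    simp only [List.foldl_cons]
    rw [hb]
    simp only [hpre1] at ih'
    by_cases hda : d = 'a'
    · rw [show pvBuildStep inp (aAcc, bAcc, cAcc) (pre.length : Int)
          = (aAcc ++ [(pre.length : Int)], bAcc, cAcc) by
        simp [pvBuildStep, hget, hda]]
      rw [ih']
      simp [pvPos, hda, List.append_assoc]
    · by_cases hdb : d = 'b'
      · rw [show pvBuildStep inp (aAcc, bAcc, cAcc) (pre.length : Int)
            = (aAcc, bAcc ++ [(pre.length : Int)], cAcc) by
          simp [pvBuildStep, hget, hdb]]
        rw [ih']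
        simp [pvPos, hdb, List.append_assoc]
      · by_cases hdc : d = 'c'
        · rw [show pvBuildStep inp (aAcc, bAcc, cAcc) (pre.length : Int)
              = (aAcc, bAcc, cAcc ++ [(pre.length : Int)]) by
            simp [pvBuildStep, hget, hdc]]
          rw [ih']
          simp [pvPos, hdc, List.append_assoc]
        · rw [show pvBuildStep inp (aAcc, bAcc, cAcc) (pre.length : Int)
              = (aAcc, bAcc, cAcc) by
            simp [pvBuildStep, hget, hda, hdb, hdc]]
          rw [ih']
          simp [pvPos, hda, hdb, hdc]

theorem pvBStep_a (r g gall tb nc : Int) :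
    pvBStep (r, g, gall, tb, nc) 'a' = (r + gall + g, g + gall, gall, tb, nc) := by
  simp [pvBStep]

theorem pvBStep_b (r g gall tb nc : Int) :
    pvBStep (r, g, gall, tb, nc) 'b'
      = (r, g, gall + PySem.Int.floordiv (nc * (nc + 1)) 2 + tb,
         tb + PySem.Int.floordiv (nc * (nc + 1)) 2, nc) := by
  simp [pvBStep]

theorem pvBStep_c (r g gall tb nc : Int) :
    pvBStep (r, g, gall, tb, nc) 'c' = (r, g, gall, tb, nc + 1) := by
  simp [pvBStep]

theorem pvBStep_other {ch : Char} (h1 : ¬ ch = 'a') (h2 : ¬ ch = 'b') (h3 : ¬ ch = 'c')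
    (st : Int × Int × Int × Int × Int) : pvBStep st ch = st := by
  simp [pvBStep, h1, h2, h3]

theorem pvPos_cons_eq (d : Char) (t : List Char) (k : Int) :
    pvPos d (d :: t) k = k :: pvPos d t (k + 1) := by
  simp [pvPos]

theorem pvPos_cons_ne {c d : Char} (h : ¬ d = c) (t : List Char) (k : Int) :
    pvPos c (d :: t) k = pvPos c t (k + 1) := by
  simp [pvPos, h]

-- B's backward pass computes A's sums over the position lists
theorem pv_main : ∀ (u : List Char) (k : Int),
    u.foldr (fun ch st => pvBStep st ch) (0, 0, 0, 0, 0)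
      = (pvFS (pvPos 'b' u k) (pvPos 'c' u k) (pvPos 'a' u k) 0,
         pvGA (pvPos 'b' u k) (pvPos 'c' u k) (pvPos 'a' u k),
         pvGAll (pvPos 'c' u k) (pvPos 'b' u k) 0,
         pvTS (pvPos 'c' u k) (pvPos 'b' u k),
         (((pvPos 'c' u k).length : Nat) : Int)) := by
  intro u
  induction u with
  | nil => intro k; simp [pvPos, pvFS, pvGA, pvGAll, pvTS]
  | cons ch t ih =>
    intro k
    have hA : ∀ y ∈ pvPos 'a' t (k + 1), k < y := fun y hy => by
      have := pvPos_le t (k + 1) y hy; omega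
    have hB : ∀ y ∈ pvPos 'b' t (k + 1), k < y := fun y hy => by
      have := pvPos_le t (k + 1) y hy; omega
    have hC : ∀ y ∈ pvPos 'c' t (k + 1), k < y := fun y hy => by
      have := pvPos_le t (k + 1) y hy; omega
    rw [List.foldr_cons, ih (k + 1)]
    by_cases ha : ch = 'a'
    · subst ha
      have hg := pvGS_all k (pvPos 'c' t (k + 1)) (pvPos 'b' t (k + 1)) hB 0
      have hf : pvFS (pvPos 'b' t (k + 1)) (pvPos 'c' t (k + 1)) (pvPos 'a' t (k + 1)) 1
          = pvFS (pvPos 'b' t (k + 1)) (pvPos 'c' t (k + 1)) (pvPos 'a' t (k + 1)) 0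
            + pvGA (pvPos 'b' t (k + 1)) (pvPos 'c' t (k + 1)) (pvPos 'a' t (k + 1)) := by
        simpa using pvFS_succ (pvPos 'b' t (k + 1)) (pvPos 'c' t (k + 1))
          (pvPos 'a' t (k + 1)) 0
      rw [pvBStep_a, pvPos_cons_eq, pvPos_cons_ne (by decide) t k,
        pvPos_cons_ne (by decide) t k]
      simp only [pvFS, pvGA, zero_add, one_mul, hg, hf, Prod.mk.injEq]
      and_intros <;> first | trivial | ring
    · by_cases hb : ch = 'b'
      · subst hb
        have hcs := pvCS_all k (pvPos 'c' t (k + 1)) hC 0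
        have hsucc : pvGAll (pvPos 'c' t (k + 1)) (pvPos 'b' t (k + 1)) 1
            = pvGAll (pvPos 'c' t (k + 1)) (pvPos 'b' t (k + 1)) 0
              + pvTS (pvPos 'c' t (k + 1)) (pvPos 'b' t (k + 1)) := by
          simpa using pvGAll_succ (pvPos 'c' t (k + 1)) (pvPos 'b' t (k + 1)) 0
        have htri := pvTri_floordiv (pvPos 'c' t (k + 1)).length
        rw [pvBStep_b, pvPos_cons_eq, pvPos_cons_ne (by decide) t k,
          pvPos_cons_ne (by decide) t k,
          pvFS_bcons k _ _ _ hA, pvGA_bcons k _ _ _ hA]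
        simp only [pvGAll, pvTS, zero_add, zero_mul, one_mul, hcs, hsucc, htri,
          Prod.mk.injEq]
        and_intros <;> first | trivial | ring
      · by_cases hc : ch = 'c'
        · subst hc
          rw [pvBStep_c, pvPos_cons_eq, pvPos_cons_ne (by decide) t k,
            pvPos_cons_ne (by decide) t k,
            pvFS_ccons k _ _ hB, pvGA_ccons k _ _ hB,
            pvTS_ccons k _ _ hB, pvGAll_ccons k _ _ hB 0]
          simp [List.length_cons]
        · rw [pvBStep_other ha hb hc, pvPos_cons_ne ha t k, pvPos_cons_ne hb t k,
            pvPos_cons_ne hc t k]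

theorem computeSubString_eq (inp : String) :
    computeSubString inp = pvFS (pvPos 'b' inp.toList 0) (pvPos 'c' inp.toList 0)
      (pvPos 'a' inp.toList 0) 0 := by
  unfold computeSubString
  have hbuild := pv_build inp inp.toList [] rfl [] [] []
  simp only [List.length_nil, Nat.cast_zero, zero_add, List.nil_append] at hbuild
  simp only [PySem.Str.len_eq, hbuild, pv_afold, zero_add]

theorem computeSubString_alt_eq (inp : String) :
    computeSubString_alt inp = pvFS (pvPos 'b' inp.toList 0) (pvPos 'c' inp.toList 0)
      (pvPos 'a' inp.toList 0) 0 := by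
  unfold computeSubString_alt
  rw [List.foldl_reverse, pv_main inp.toList 0]

-- ===== VERDICT (by name: the statement is the Claim_ definition above) =====
theorem computeSubString_spec : Claim_equal_computeSubString := by
  intro inp _
  unfold Spec_computeSubString
  rw [computeSubString_eq, computeSubString_alt_eq]
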